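-- pv_equiv track=rewrite | github.com/span-fund/reports | pipeline/legal_matching.py | _mask_matches_name
-- ===== SOURCE A (Python) =====
-- def _mask_matches_name(mask: str, name: str) -> bool:
--     """Check whether a single masked token (e.g. "P****") is compatible with
--     a single name token (e.g. "Piotr"): same first letter, same length, and
--     every non-leading character is a mask asterisk."""
--     if not mask or not name:
--         return False
--     if len(mask) != len(name):
--         return False
--     if mask[0].lower() != name[0].lower():
--         return False
--     # Every char after position 0 in the mask must be a mask placeholder.
--     return all(ch == "*" for ch in mask[1:])
-- ===== SOURCE B (Python) =====
-- def _mask_matches_name(mask: str, name: str) -> bool: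
--     """Build the canonical mask a name would produce (first letter + asterisks)
--     and compare it, lowercased, against the given mask in one string equality."""
--     if not mask or not name:
--         return False
--     return mask.lower() == name[0].lower() + "*" * (len(name) - 1)
-- ===== Notes on version B (the rewrite author's own statement) =====
-- stated objective: simpler
-- what changed: Replaces the three separate checks (length, first letter, per-char asterisk scan of the tail) with constructing the canonical expected mask from the name and a single whole-string equality on the lowercased mask.
import Mathlib
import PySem

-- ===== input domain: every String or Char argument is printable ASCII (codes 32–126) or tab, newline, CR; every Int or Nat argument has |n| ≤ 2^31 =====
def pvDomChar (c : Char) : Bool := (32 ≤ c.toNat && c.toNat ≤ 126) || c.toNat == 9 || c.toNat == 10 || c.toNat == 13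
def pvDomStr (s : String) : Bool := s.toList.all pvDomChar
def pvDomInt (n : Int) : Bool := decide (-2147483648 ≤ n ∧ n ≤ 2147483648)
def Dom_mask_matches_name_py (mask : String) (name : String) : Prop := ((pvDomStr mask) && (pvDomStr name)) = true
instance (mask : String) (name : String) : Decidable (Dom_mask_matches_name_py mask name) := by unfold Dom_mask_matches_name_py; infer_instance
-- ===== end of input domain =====

-- B replaces A's three separate checks by constructing the canonical expected mask
-- from the name and comparing it against the lowercased mask in one string equality (simpler).


-- ===== PORT A =====
-- transliteration of _mask_matches_name: empty guard, length check,
-- first-letter check, then a scan of mask[1:] for asterisks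
def mask_matches_name_py (mask : String) (name : String) : Bool :=
  match mask.toList, name.toList with
  | [], _ => false                               -- not mask
  | _, [] => false                               -- not name
  | mc :: mrest, nc :: nrest =>
    if (mc :: mrest).length ≠ (nc :: nrest).length then false
    else if PySem.Chars.lowerChar mc ≠ PySem.Chars.lowerChar nc then false
    else mrest.all (fun ch => ch == '*')         -- all(ch == "*" for ch in mask[1:])

-- ===== PORT B =====
-- transliteration of Source B: empty guard, then
-- mask.lower() == name[0].lower() + "*" * (len(name) - 1)
def mask_matches_name_py_alt (mask : String) (name : String) : Bool :=
  match mask.toList, name.toList with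
  | [], _ => false
  | _, [] => false
  | m, nc :: nrest =>
    PySem.Chars.lower m ==
      PySem.Chars.lowerChar nc :: PySem.List.pyRepeat ['*'] (((nc :: nrest).length : Int) - 1)

-- ===== PRECONDITION & SPEC =====
def Spec_mask_matches_name_py (mask : String) (name : String) (out : Bool) : Prop := out = mask_matches_name_py_alt mask name
instance (mask : String) (name : String) (out : Bool) : Decidable (Spec_mask_matches_name_py mask name out) := by unfold Spec_mask_matches_name_py; infer_instance

-- ===== CLAIM (what is proved, stated in full; the proofs are below) =====
def Claim_equal_mask_matches_name_py : Prop := ∀ (mask : String) (name : String), Dom_mask_matches_name_py mask name → Spec_mask_matches_name_py mask name (mask_matches_name_py mask name)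

-- ===== LEMMAS AND PROOFS =====

theorem lowerChar_eq_star (c : Char) : (PySem.Chars.lowerChar c = '*') ↔ c = '*' := by
  unfold PySem.Chars.lowerChar
  split_ifs with h
  · simp only [PySem.Chars.isupper, Bool.and_eq_true, decide_eq_true_eq, Char.le_def] at h
    have hr : 65 ≤ c.toNat ∧ c.toNat ≤ 90 := by
      obtain ⟨h1, h2⟩ := h
      exact ⟨h1, h2⟩
    have hv : (c.toNat + 32).isValidChar := by left; omega
    have ht : (Char.ofNat (c.toNat + 32)).toNat = c.toNat + 32 := by
      rw [Char.toNat_ofNat]; simp [hv]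
    constructor
    · intro he
      exfalso
      have := congrArg Char.toNat he
      rw [ht] at this
      simp at this; omega
    · intro he; subst he; exfalso; revert hr; decide
  · simp

theorem lower_tail_eq_replicate (mr : List Char) :
    (List.map PySem.Chars.lowerChar mr = List.replicate mr.length '*') ↔ (∀ c ∈ mr, c = '*') := by
  rw [show mr.length = (List.map PySem.Chars.lowerChar mr).length by simp, List.eq_replicate_iff]
  simp [lowerChar_eq_star]

theorem core_eq (mc : Char) (mr : List Char) (nc : Char) (nr : List Char) :
    (if (mc :: mr).length ≠ (nc :: nr).length then false
     else if PySem.Chars.lowerChar mc ≠ PySem.Chars.lowerChar nc then false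
     else mr.all (fun ch => ch == '*'))
    = (PySem.Chars.lower (mc :: mr) ==
        PySem.Chars.lowerChar nc :: PySem.List.pyRepeat ['*'] (((nc :: nr).length : Int) - 1)) := by
  have hrep : PySem.List.pyRepeat ['*'] (((nc :: nr).length : Int) - 1)
      = List.replicate nr.length '*' := by
    rw [PySem.List.pyRepeat_singleton]; congr 1; simp
  rw [hrep]
  simp only [PySem.Chars.lower, List.map]
  by_cases hl : mr.length = nr.length
  · by_cases hc : PySem.Chars.lowerChar mc = PySem.Chars.lowerChar nc
    · simp only [hl, hc, List.length_cons, ne_eq, not_true_eq_false, if_false]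
      rw [Bool.eq_iff_iff]
      simp only [List.all_eq_true, beq_iff_eq, List.cons.injEq, true_and]
      rw [← hl, lower_tail_eq_replicate]
    · rw [Bool.eq_iff_iff]; simp [hl, hc]
  · rw [Bool.eq_iff_iff]
    simp only [List.length_cons, ne_eq, Nat.add_right_cancel_iff, hl, not_false_eq_true,
      if_true, beq_iff_eq, List.cons.injEq]
    constructor
    · intro h; exact absurd h (by simp)
    · rintro ⟨-, h2⟩; exact absurd (by simpa using congrArg List.length h2) hl

-- ===== VERDICT (by name: the statement is the Claim_ definition above) =====
theorem mask_matches_name_py_spec : Claim_equal_mask_matches_name_py := by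
  intro mask name _
  unfold Spec_mask_matches_name_py mask_matches_name_py mask_matches_name_py_alt
  rcases hm : mask.toList with _ | ⟨mc, mr⟩ <;> rcases hn : name.toList with _ | ⟨nc, nr⟩
  · rfl
  · rfl
  · rfl
  · exact core_eq mc mr nc nr
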